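-- pv_equiv track=rewrite | github.com/JSanchoG/user_management | user_management.py | validate_regon
-- ===== SOURCE A (Python) =====
-- def validate_regon(regon:str) -> bool:
--     '''
--     Waliduje numer REGON
--     '''
--     if len(regon) not in [9, 14] or not regon.isdigit():
--         return False
--
--     if len(regon) == 9:
--         weights = [8, 9, 2, 3, 4, 5, 6, 7]
--         checksum = sum(int(digit) * weight for digit, weight in zip(regon[:8], weights)) % 11
--         checksum = 0 if checksum == 10 else checksum
--         return checksum == int(regon[8])
--
--     if len(regon) == 14:
--         if not validate_regon(regon[:9]):
--             return False
--         weights = [2, 4, 8, 5, 0, 9, 7, 3, 6, 1, 2, 4, 8]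
--         checksum = sum(int(digit) * weight for digit, weight in zip(regon[:13], weights)) % 11
--         checksum = 0 if checksum == 10 else checksum
--         return checksum == int(regon[13])
-- ===== SOURCE B (Python) =====
-- def validate_regon(regon: str) -> bool:
--     '''
--     Waliduje numer REGON
--     '''
--     n = len(regon)
--     if n != 9 and n != 14:
--         return False
--     W9 = (8, 9, 2, 3, 4, 5, 6, 7)
--     W14 = (2, 4, 8, 5, 0, 9, 7, 3, 6, 1, 2, 4, 8)
--     s9 = 0
--     s14 = 0
--     # single pass: digit-check and both weighted sums fused into one loop
--     for i, ch in enumerate(regon):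
--         if not ('0' <= ch <= '9'):
--             return False
--         d = ord(ch) - 48
--         if i < 8:
--             s9 += d * W9[i]
--         if i < 13:
--             s14 += d * W14[i]
--     # x % 11 % 10 maps 10 -> 0 and leaves 0..9 unchanged
--     if s9 % 11 % 10 != ord(regon[8]) - 48:
--         return False
--     return n == 9 or s14 % 11 % 10 == ord(regon[13]) - 48
-- ===== Notes on version B (the rewrite author's own statement) =====
-- stated objective: alternative
-- what changed: Replaced A's two staged zip-comprehension passes plus self-recursion on regon[:9] by one fused indexed loop that validates digits and accumulates both weighted sums simultaneously, with the 10->0 mapping expressed as %11%10 instead of a conditional.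
import Mathlib
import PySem

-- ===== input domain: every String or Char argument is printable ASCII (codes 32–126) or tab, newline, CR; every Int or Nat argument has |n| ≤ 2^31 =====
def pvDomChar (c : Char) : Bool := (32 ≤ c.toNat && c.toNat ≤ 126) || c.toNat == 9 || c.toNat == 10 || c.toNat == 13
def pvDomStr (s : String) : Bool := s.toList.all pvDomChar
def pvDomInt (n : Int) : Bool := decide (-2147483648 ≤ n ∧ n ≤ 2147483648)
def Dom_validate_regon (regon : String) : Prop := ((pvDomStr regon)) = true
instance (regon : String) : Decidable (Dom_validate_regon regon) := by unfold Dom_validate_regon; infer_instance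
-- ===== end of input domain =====

-- B fuses A's staged zip-sum passes and self-recursion into one indexed loop that checks
-- digits and accumulates both weighted sums at once (objective: alternative).

-- int(d) / ord(d)-48 for a digit character; exact on '0'..'9', which is all that is
-- ever passed (both Pythons read digit values only behind their digit guards).
def digitVal (c : Char) : Int := (c.toNat : Int) - 48

-- ===== PORT A =====
-- A transcribed on List Char (the recursion is on the regon[:9] slice).
def validate_regon_core (s : List Char) : Bool :=
  if ¬ (s.length = 9 ∨ s.length = 14) ∨ ¬ PySem.Chars.strIsdigit s then false
  else if s.length = 9 then
    -- checksum = sum(int(digit)*weight for digit, weight in zip(regon[:8], weights)) % 11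
    let checksum := PySem.Int.mod
      (((PySem.List.slice s none (some 8)).zip ([8, 9, 2, 3, 4, 5, 6, 7] : List Int)).map
        (fun p => digitVal p.1 * p.2)).sum 11
    let checksum := if checksum = 10 then 0 else checksum
    decide (checksum = digitVal (PySem.List.pyGetD s 8 '0'))  -- regon[8]; index in range here
  else if h : s.length = 14 then
    if ¬ validate_regon_core (PySem.List.slice s none (some 9)) then false
    else
      let checksum := PySem.Int.mod
        (((PySem.List.slice s none (some 13)).zip
            ([2, 4, 8, 5, 0, 9, 7, 3, 6, 1, 2, 4, 8] : List Int)).map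
          (fun p => digitVal p.1 * p.2)).sum 11
      let checksum := if checksum = 10 then 0 else checksum
      decide (checksum = digitVal (PySem.List.pyGetD s 13 '0'))  -- regon[13]
  else false  -- unreachable: length is 9 or 14 here
termination_by s.length
decreasing_by
  have h9 : PySem.List.slice s none (some (9:Int)) = s.take (9:Int).toNat :=
    PySem.List.slice_to s (by norm_num)
  simp [h9]
  omega

def validate_regon (regon : String) : Bool := validate_regon_core regon.toList

-- ===== PORT B =====
def bW9 : List Int := [8, 9, 2, 3, 4, 5, 6, 7]
def bW14 : List Int := [2, 4, 8, 5, 0, 9, 7, 3, 6, 1, 2, 4, 8]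

-- the fused for-loop of Source B: early return (None = 'return False'), index i, two accumulators
def bloop : List Char → Nat → Int → Int → Option (Int × Int)
  | [], _, s9, s14 => some (s9, s14)
  | ch :: rest, i, s9, s14 =>
    if ¬ ('0' ≤ ch ∧ ch ≤ '9') then none
    else
      let d : Int := digitVal ch
      bloop rest (i + 1)
        (if i < 8 then s9 + d * bW9.getD i 0 else s9)
        (if i < 13 then s14 + d * bW14.getD i 0 else s14)

def validate_regon_alt_core (s : List Char) : Bool :=
  if s.length ≠ 9 ∧ s.length ≠ 14 then false
  else
    match bloop s 0 0 0 with
    | none => false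
    | some (s9, s14) =>
      -- x % 11 % 10 maps 10 -> 0 and leaves 0..9 unchanged
      if PySem.Int.mod (PySem.Int.mod s9 11) 10 ≠ digitVal (PySem.List.pyGetD s 8 '0') then false
      else decide (s.length = 9) ||
        decide (PySem.Int.mod (PySem.Int.mod s14 11) 10 = digitVal (PySem.List.pyGetD s 13 '0'))

def validate_regon_alt (regon : String) : Bool := validate_regon_alt_core regon.toList

-- ===== PRECONDITION & SPEC =====
def Spec_validate_regon (regon : String) (out : Bool) : Prop := out = validate_regon_alt regon
instance (regon : String) (out : Bool) : Decidable (Spec_validate_regon regon out) := by unfold Spec_validate_regon; infer_instance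

-- ===== CLAIM (what is proved, stated in full; the proofs are below) =====
def Claim_equal_validate_regon : Prop := ∀ (regon : String), Dom_validate_regon regon → Spec_validate_regon regon (validate_regon regon)

-- ===== LEMMAS AND PROOFS =====

-- A's check on digits/weights/control, shared shape of both of A's branches
def checkA (digits : List Char) (weights : List Int) (control : Char) : Bool :=
  let t := PySem.Int.mod ((digits.zip weights).map (fun p => digitVal p.1 * p.2)).sum 11
  decide ((if t = 10 then 0 else t) = digitVal control)

theorem core_eq (s : List Char) : validate_regon_core s =
    (if ¬ (s.length = 9 ∨ s.length = 14) ∨ ¬ PySem.Chars.strIsdigit s then false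
     else if s.length = 9 then
       checkA (PySem.List.slice s none (some 8)) [8, 9, 2, 3, 4, 5, 6, 7] (PySem.List.pyGetD s 8 '0')
     else
       checkA (PySem.List.slice s none (some 8)) [8, 9, 2, 3, 4, 5, 6, 7] (PySem.List.pyGetD s 8 '0') &&
       checkA (PySem.List.slice s none (some 13)) [2, 4, 8, 5, 0, 9, 7, 3, 6, 1, 2, 4, 8]
         (PySem.List.pyGetD s 13 '0')) := by
  rw [validate_regon_core]
  by_cases hg : ¬ (s.length = 9 ∨ s.length = 14) ∨ ¬ PySem.Chars.strIsdigit s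
  · rw [if_pos hg, if_pos hg]
  · rw [if_neg hg, if_neg hg]
    push Not at hg
    obtain ⟨hlen, hdig⟩ := hg
    by_cases h9 : s.length = 9
    · rw [if_pos h9, if_pos h9]
      simp [checkA]
    · have h14 : s.length = 14 := (hlen.resolve_left h9)
      rw [if_neg h9, if_neg h9, dif_pos h14]
      have hslice : PySem.List.slice s none (some (9:Int)) = s.take 9 :=
        PySem.List.slice_to s (by norm_num)
      have hrec : validate_regon_core (PySem.List.slice s none (some 9)) =
          checkA (PySem.List.slice s none (some 8)) [8, 9, 2, 3, 4, 5, 6, 7]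
            (PySem.List.pyGetD s 8 '0') := by
        rw [hslice, validate_regon_core]
        have hl : (s.take 9).length = 9 := by simp [h14]
        have hd : PySem.Chars.strIsdigit (s.take 9) = true := by
          simp only [PySem.Chars.strIsdigit, Bool.and_eq_true, List.all_eq_true] at hdig ⊢
          refine ⟨?_, fun c hc => hdig.2 c (List.mem_of_mem_take hc)⟩
          simp [← List.length_eq_zero_iff, hl]
        have hsl8 : PySem.List.slice (s.take 9) none (some (8:Int)) =
            PySem.List.slice s none (some 8) := by
          rw [PySem.List.slice_to _ (by norm_num), PySem.List.slice_to s (by norm_num)]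
          simp [List.take_take]
        have hget8 : PySem.List.pyGetD (s.take 9) 8 '0' = PySem.List.pyGetD s 8 '0' := by
          rw [PySem.List.pyGetD_of_nonneg _ _ (by norm_num),
              PySem.List.pyGetD_of_nonneg _ _ (by norm_num)]
          simp [List.getD]
        rw [if_neg (by simp [hl, hd]), if_pos hl, hsl8, hget8]
        simp [checkA]
      rw [hrec]
      cases hc : checkA (PySem.List.slice s none (some 8)) [8, 9, 2, 3, 4, 5, 6, 7]
          (PySem.List.pyGetD s 8 '0') with
      | false => simp
      | true => simp [checkA]

-- %11%10 equals A's "0 if x == 10 else x" mapping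
theorem modmod (t : Int) :
    PySem.Int.mod (PySem.Int.mod t 11) 10 =
      (if PySem.Int.mod t 11 = 10 then 0 else PySem.Int.mod t 11) := by
  simp only [PySem.Int.mod, Int.fmod_eq_emod]
  have h1 : 0 ≤ t % 11 := Int.emod_nonneg t (by norm_num)
  have h2 : t % 11 < 11 := Int.emod_lt_of_pos t (by norm_num)
  split_ifs with h <;> omega

theorem bloop_none (s : List Char) (i : Nat) (a b : Int)
    (h : ∃ c ∈ s, ¬ ('0' ≤ c ∧ c ≤ '9')) : bloop s i a b = none := by
  induction s generalizing i a b with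
  | nil => simp at h
  | cons ch rest ih =>
    rw [bloop]
    by_cases hc : ('0' ≤ ch ∧ ch ≤ '9')
    · rw [if_neg (by simpa using hc)]
      apply ih
      rcases h with ⟨c, hm, hnc⟩
      rcases List.mem_cons.1 hm with rfl | hm
      · exact absurd hc hnc
      · exact ⟨c, hm, hnc⟩
    · rw [if_pos (by simpa using hc)]

def wsum (s : List Char) (w : List Int) : Int :=
  ((s.zip w).map (fun p => digitVal p.1 * p.2)).sum

theorem wsum_cons_of_lt {w : List Int} {i : Nat} (hi : i < w.length) (ch : Char) (rest : List Char) :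
    wsum (ch :: rest) (w.drop i) = digitVal ch * w.getD i 0 + wsum rest (w.drop (i + 1)) := by
  have hd : w.drop i = w[i] :: w.drop (i + 1) := List.drop_eq_getElem_cons hi
  unfold wsum
  rw [hd, List.zip_cons_cons, List.map_cons, List.sum_cons,
    List.getD_eq_getElem?_getD, List.getElem?_eq_getElem hi]
  rfl

theorem wsum_nil_of_ge {w : List Int} {i : Nat} (hi : w.length ≤ i) (s : List Char) :
    wsum s (w.drop i) = 0 := by
  rw [List.drop_eq_nil_of_le hi]
  simp [wsum]

theorem bloop_some (s : List Char) (i : Nat) (a b : Int)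
    (h : ∀ c ∈ s, ('0' ≤ c ∧ c ≤ '9')) :
    bloop s i a b = some (a + wsum s (bW9.drop i), b + wsum s (bW14.drop i)) := by
  induction s generalizing i a b with
  | nil => simp [bloop, wsum]
  | cons ch rest ih =>
    rw [bloop, if_neg (by simpa using h ch (List.mem_cons_self))]
    rw [ih _ _ _ (fun c hc => h c (List.mem_cons_of_mem _ hc))]
    have h9len : bW9.length = 8 := by decide
    have h14len : bW14.length = 13 := by decide
    rw [Option.some.injEq, Prod.mk.injEq]
    by_cases h8 : i < 8 <;> by_cases h13 : i < 13
    · rw [if_pos h8, if_pos h13,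
        wsum_cons_of_lt (by omega) ch rest, wsum_cons_of_lt (by omega) ch rest]
      constructor <;> ring
    · omega
    · rw [if_neg h8, if_pos h13,
        wsum_cons_of_lt (w := bW14) (by omega) ch rest,
        wsum_nil_of_ge (w := bW9) (by omega), wsum_nil_of_ge (w := bW9) (by omega)]
      constructor <;> ring
    · rw [if_neg h8, if_neg h13,
        wsum_nil_of_ge (w := bW9) (by omega), wsum_nil_of_ge (w := bW9) (by omega),
        wsum_nil_of_ge (w := bW14) (by omega), wsum_nil_of_ge (w := bW14) (by omega)]
      exact ⟨rfl, rfl⟩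

theorem zip_take_length {α β : Type} (s : List α) (w : List β) :
    (s.take w.length).zip w = s.zip w := by
  induction s generalizing w with
  | nil => simp
  | cons a s ih =>
    cases w with
    | nil => simp
    | cons b w => simp [ih]

-- A's checkA on the sliced prefix equals B's %11%10 comparison on the full fused sum
theorem checkA_eq_B (s : List Char) (w : List Int) (ctrl : Char)
    (hw : PySem.List.slice s none (some (w.length : Int)) = s.take w.length) :
    checkA (PySem.List.slice s none (some (w.length : Int))) w ctrl =
      decide (PySem.Int.mod (PySem.Int.mod (wsum s w) 11) 10 = digitVal ctrl) := by
  rw [hw, modmod]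
  unfold checkA wsum
  rw [zip_take_length]

theorem core_alt_eq (s : List Char) : validate_regon_core s = validate_regon_alt_core s := by
  rw [core_eq, validate_regon_alt_core]
  by_cases hlen : s.length = 9 ∨ s.length = 14
  · have hB : ¬ (s.length ≠ 9 ∧ s.length ≠ 14) := by tauto
    rw [if_neg hB]
    by_cases hdig : PySem.Chars.strIsdigit s
    · have hA : ¬ (¬ (s.length = 9 ∨ s.length = 14) ∨ ¬ PySem.Chars.strIsdigit s = true) := by
        push Not
        exact ⟨hlen, hdig⟩
      rw [if_neg hA]
      have hall : ∀ c ∈ s, ('0' ≤ c ∧ c ≤ '9') := by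
        simp only [PySem.Chars.strIsdigit, Bool.and_eq_true, List.all_eq_true,
          PySem.Chars.isdigit, decide_eq_true_eq] at hdig
        exact hdig.2
      rw [bloop_some s 0 0 0 hall]
      simp only [List.drop_zero, zero_add]
      have e9 : checkA (PySem.List.slice s none (some 8)) [8, 9, 2, 3, 4, 5, 6, 7]
          (PySem.List.pyGetD s 8 '0') =
          decide (PySem.Int.mod (PySem.Int.mod (wsum s bW9) 11) 10 =
            digitVal (PySem.List.pyGetD s 8 '0')) := by
        have := checkA_eq_B s bW9 (PySem.List.pyGetD s 8 '0')
          (PySem.List.slice_to s (by norm_num))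
        simpa [bW9] using this
      have e14 : checkA (PySem.List.slice s none (some 13)) [2, 4, 8, 5, 0, 9, 7, 3, 6, 1, 2, 4, 8]
          (PySem.List.pyGetD s 13 '0') =
          decide (PySem.Int.mod (PySem.Int.mod (wsum s bW14) 11) 10 =
            digitVal (PySem.List.pyGetD s 13 '0')) := by
        have := checkA_eq_B s bW14 (PySem.List.pyGetD s 13 '0')
          (PySem.List.slice_to s (by norm_num))
        simpa [bW14] using this
      by_cases hc : PySem.Int.mod (PySem.Int.mod (wsum s bW9) 11) 10 =
          digitVal (PySem.List.pyGetD s 8 '0')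
      · have hnn : ¬ (PySem.Int.mod (PySem.Int.mod (wsum s bW9) 11) 10 ≠
            digitVal (PySem.List.pyGetD s 8 '0')) := by simpa using hc
        rw [if_neg hnn]
        have hc' : wsum s bW9 % 11 % 10 = digitVal (PySem.List.pyGetD s 8 '0') := by
          simpa [PySem.Int.mod, Int.fmod_eq_emod] using hc
        rcases hlen with h9 | h14
        · rw [if_pos h9, e9]
          simp [hc', h9]
        · have h9 : s.length ≠ 9 := by omega
          rw [if_neg h9, e9, e14]
          simp [hc', h9]
      · have hcc : PySem.Int.mod (PySem.Int.mod (wsum s bW9) 11) 10 ≠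
            digitVal (PySem.List.pyGetD s 8 '0') := hc
        rw [if_pos hcc]
        have hc' : ¬ (wsum s bW9 % 11 % 10 = digitVal (PySem.List.pyGetD s 8 '0')) := by
          simpa [PySem.Int.mod, Int.fmod_eq_emod] using hc
        rcases hlen with h9 | h14
        · rw [if_pos h9, e9]
          simp [hc']
        · have h9 : s.length ≠ 9 := by omega
          rw [if_neg h9, e9]
          simp [hc']
    · have hA : (¬ (s.length = 9 ∨ s.length = 14) ∨ ¬ PySem.Chars.strIsdigit s = true) :=
        Or.inr (by simpa using hdig)
      rw [if_pos hA]
      have hne : s ≠ [] := by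
        rintro rfl
        rcases hlen with h | h <;> simp at h
      have hex : ∃ c ∈ s, ¬ ('0' ≤ c ∧ c ≤ '9') := by
        simp only [PySem.Chars.strIsdigit, Bool.and_eq_true, List.all_eq_true,
          PySem.Chars.isdigit, decide_eq_true_eq] at hdig
        rcases not_and_or.1 hdig with h | h
        · exact absurd (by simpa using hne) h
        · push Not at h
          rcases h with ⟨c, hm, hc⟩
          exact ⟨c, hm, by simpa using hc⟩
      rw [bloop_none s 0 0 0 hex]
  · have hA : (¬ (s.length = 9 ∨ s.length = 14) ∨ ¬ PySem.Chars.strIsdigit s = true) :=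
      Or.inl hlen
    have hB : (s.length ≠ 9 ∧ s.length ≠ 14) := by tauto
    rw [if_pos hA, if_pos hB]

-- ===== VERDICT (by name: the statement is the Claim_ definition above) =====
theorem validate_regon_spec : Claim_equal_validate_regon := by
  intro regon _
  show validate_regon regon = validate_regon_alt regon
  simp only [validate_regon, validate_regon_alt, core_alt_eq]
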